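-- pv_equiv track=rewrite | github.com/GerGreta/SuperBot | logic_summa.py | build_psychomatrix
-- ===== SOURCE A (Python) =====
-- from collections import Counter
-- from collections import Counter
--
-- def build_psychomatrix(day: int, month: int, year: int) -> list[list[str]]:
--     """
--     Строит психоматрицу (квадрат Пифагора) по дате рождения
--     Возвращает матрицу 3×3 из строк
--     """
--     digits = f"{day}{month}{year}"
--     digits = [d for d in digits if d != "0"]
--     counts = Counter(digits)
--
--     layout = [
--         ["3", "6", "9"],
--         ["2", "5", "8"],
--         ["1", "4", "7"],
--     ]
--
--     matrix = []
--     for row in layout: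
--         matrix.append([
--             digit * counts.get(digit, 0) for digit in row
--         ])
--
--     return matrix
-- ===== SOURCE B (Python) =====
-- def build_psychomatrix(day: int, month: int, year: int) -> list[list[str]]:
--     """
--     Строит психоматрицу (квадрат Пифагора) по дате рождения
--     Возвращает матрицу 3×3 из строк
--     """
--     pos = {
--         "3": (0, 0), "6": (0, 1), "9": (0, 2),
--         "2": (1, 0), "5": (1, 1), "8": (1, 2),
--         "1": (2, 0), "4": (2, 1), "7": (2, 2),
--     }
--     matrix = [["", "", ""], ["", "", ""], ["", "", ""]]
--     for d in f"{day}{month}{year}":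
--         if d in pos:
--             r, c = pos[d]
--             matrix[r][c] += d
--     return matrix
-- ===== Notes on version B (the rewrite author's own statement) =====
-- stated objective: idiomatic
-- what changed: Replaces the Counter-then-gather (count all digits, then look each layout cell's digit up) with a single scatter pass: a literal digit->(row,col) position dict and one loop over the date string appending each digit to its cell.
import Mathlib
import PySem

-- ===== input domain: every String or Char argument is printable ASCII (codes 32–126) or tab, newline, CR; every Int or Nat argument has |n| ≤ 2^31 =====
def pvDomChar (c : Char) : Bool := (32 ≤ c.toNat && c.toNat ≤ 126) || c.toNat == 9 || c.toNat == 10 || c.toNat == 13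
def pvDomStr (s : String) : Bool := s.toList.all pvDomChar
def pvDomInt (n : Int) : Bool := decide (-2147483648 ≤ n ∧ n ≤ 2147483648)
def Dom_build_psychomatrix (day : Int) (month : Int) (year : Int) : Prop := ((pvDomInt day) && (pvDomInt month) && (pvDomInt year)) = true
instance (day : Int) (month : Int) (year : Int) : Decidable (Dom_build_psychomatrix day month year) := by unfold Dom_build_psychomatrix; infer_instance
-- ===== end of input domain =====

-- B replaces A's Counter-then-gather with an idiomatic single scatter pass over the
-- date string using a digit -> (row, col) position table; same return value.

-- ===== PORT A =====
def build_psychomatrix (day : Int) (month : Int) (year : Int) : List (List String) :=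
  let digits0 : List Char :=
    (PySem.Int.toStr day).toList ++ (PySem.Int.toStr month).toList ++ (PySem.Int.toStr year).toList
  let digits : List Char := digits0.filter (fun d => d ≠ '0')
  let counts : PySem.Dict Char Int := PySem.Dict.counter digits
  let layout : List (List Char) := [['3', '6', '9'], ['2', '5', '8'], ['1', '4', '7']]
  layout.foldl (fun matrix row =>
    matrix ++ [row.map (fun digit => String.ofList (PySem.List.pyRepeat [digit] (counts.getD digit 0)))]) []

-- ===== PORT B =====
-- matrix[r][c] += d  (string append written on the List Char side; exact for in-range r, c)
def pvAppendCell (m : List (List String)) (r c : Nat) (d : Char) : List (List String) :=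
  m.set r ((m.getD r []).set c (String.ofList (((m.getD r []).getD c "").toList ++ [d])))

def build_psychomatrix_alt (day : Int) (month : Int) (year : Int) : List (List String) :=
  let pos : PySem.Dict Char (Nat × Nat) := PySem.Dict.ofList
    [('3', (0, 0)), ('6', (0, 1)), ('9', (0, 2)),
     ('2', (1, 0)), ('5', (1, 1)), ('8', (1, 2)),
     ('1', (2, 0)), ('4', (2, 1)), ('7', (2, 2))]
  let digits : List Char :=
    (PySem.Int.toStr day).toList ++ (PySem.Int.toStr month).toList ++ (PySem.Int.toStr year).toList
  digits.foldl (fun matrix d =>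
    match pos.get? d with
    | some (r, c) => pvAppendCell matrix r c d
    | none => matrix)
    [["", "", ""], ["", "", ""], ["", "", ""]]

-- ===== PRECONDITION & SPEC =====
def Spec_build_psychomatrix (day : Int) (month : Int) (year : Int) (out : List (List String)) : Prop := out = build_psychomatrix_alt day month year
instance (day : Int) (month : Int) (year : Int) (out : List (List String)) : Decidable (Spec_build_psychomatrix day month year out) := by unfold Spec_build_psychomatrix; infer_instance

-- ===== CLAIM (what is proved, stated in full; the proofs are below) =====
def Claim_equal_build_psychomatrix : Prop := ∀ (day : Int) (month : Int) (year : Int), Dom_build_psychomatrix day month year → Spec_build_psychomatrix day month year (build_psychomatrix day month year)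

-- ===== LEMMAS AND PROOFS =====

-- the common canonical value: each cell holds its digit repeated (its count in l) times
def pvCell (l : List Char) (d : Char) : String := String.ofList (List.replicate (l.count d) d)

def pvGather (l : List Char) : List (List String) :=
  [[pvCell l '3', pvCell l '6', pvCell l '9'],
   [pvCell l '2', pvCell l '5', pvCell l '8'],
   [pvCell l '1', pvCell l '4', pvCell l '7']]

theorem pvScatter_eq_gather (l : List Char) :
    l.foldl (fun matrix d =>
      match (PySem.Dict.ofList
        [('3', ((0 : Nat), (0 : Nat))), ('6', (0, 1)), ('9', (0, 2)),
         ('2', (1, 0)), ('5', (1, 1)), ('8', (1, 2)),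
         ('1', (2, 0)), ('4', (2, 1)), ('7', (2, 2))]).get? d with
      | some (r, c) => pvAppendCell matrix r c d
      | none => matrix)
      [["", "", ""], ["", "", ""], ["", "", ""]] = pvGather l := by
  induction l using List.reverseRecOn with
  | nil => simp [pvGather, pvCell]
  | append_singleton l c ih =>
    rw [List.foldl_append, ih, List.foldl_cons, List.foldl_nil]
    by_cases h1 : c = '1'
    · subst h1
      rw [show (PySem.Dict.ofList
        [('3', ((0 : Nat), (0 : Nat))), ('6', (0, 1)), ('9', (0, 2)),
         ('2', (1, 0)), ('5', (1, 1)), ('8', (1, 2)),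
         ('1', (2, 0)), ('4', (2, 1)), ('7', (2, 2))]).get? '1' = some (2, 0) from by decide]
      simp [pvAppendCell, pvGather, pvCell, List.count_append, List.replicate_succ']
    ·
      by_cases h2 : c = '2'
      · subst h2
        rw [show (PySem.Dict.ofList
        [('3', ((0 : Nat), (0 : Nat))), ('6', (0, 1)), ('9', (0, 2)),
         ('2', (1, 0)), ('5', (1, 1)), ('8', (1, 2)),
         ('1', (2, 0)), ('4', (2, 1)), ('7', (2, 2))]).get? '2' = some (1, 0) from by decide]
        simp [pvAppendCell, pvGather, pvCell, List.count_append, List.replicate_succ']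
      ·
        by_cases h3 : c = '3'
        · subst h3
          rw [show (PySem.Dict.ofList
        [('3', ((0 : Nat), (0 : Nat))), ('6', (0, 1)), ('9', (0, 2)),
         ('2', (1, 0)), ('5', (1, 1)), ('8', (1, 2)),
         ('1', (2, 0)), ('4', (2, 1)), ('7', (2, 2))]).get? '3' = some (0, 0) from by decide]
          simp [pvAppendCell, pvGather, pvCell, List.count_append, List.replicate_succ']
        ·
          by_cases h4 : c = '4'
          · subst h4
            rw [show (PySem.Dict.ofList
        [('3', ((0 : Nat), (0 : Nat))), ('6', (0, 1)), ('9', (0, 2)),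
         ('2', (1, 0)), ('5', (1, 1)), ('8', (1, 2)),
         ('1', (2, 0)), ('4', (2, 1)), ('7', (2, 2))]).get? '4' = some (2, 1) from by decide]
            simp [pvAppendCell, pvGather, pvCell, List.count_append, List.replicate_succ']
          ·
            by_cases h5 : c = '5'
            · subst h5
              rw [show (PySem.Dict.ofList
        [('3', ((0 : Nat), (0 : Nat))), ('6', (0, 1)), ('9', (0, 2)),
         ('2', (1, 0)), ('5', (1, 1)), ('8', (1, 2)),
         ('1', (2, 0)), ('4', (2, 1)), ('7', (2, 2))]).get? '5' = some (1, 1) from by decide]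
              simp [pvAppendCell, pvGather, pvCell, List.count_append, List.replicate_succ']
            ·
              by_cases h6 : c = '6'
              · subst h6
                rw [show (PySem.Dict.ofList
        [('3', ((0 : Nat), (0 : Nat))), ('6', (0, 1)), ('9', (0, 2)),
         ('2', (1, 0)), ('5', (1, 1)), ('8', (1, 2)),
         ('1', (2, 0)), ('4', (2, 1)), ('7', (2, 2))]).get? '6' = some (0, 1) from by decide]
                simp [pvAppendCell, pvGather, pvCell, List.count_append, List.replicate_succ']
              ·
                by_cases h7 : c = '7'
                · subst h7
                  rw [show (PySem.Dict.ofList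
        [('3', ((0 : Nat), (0 : Nat))), ('6', (0, 1)), ('9', (0, 2)),
         ('2', (1, 0)), ('5', (1, 1)), ('8', (1, 2)),
         ('1', (2, 0)), ('4', (2, 1)), ('7', (2, 2))]).get? '7' = some (2, 2) from by decide]
                  simp [pvAppendCell, pvGather, pvCell, List.count_append, List.replicate_succ']
                ·
                  by_cases h8 : c = '8'
                  · subst h8
                    rw [show (PySem.Dict.ofList
        [('3', ((0 : Nat), (0 : Nat))), ('6', (0, 1)), ('9', (0, 2)),
         ('2', (1, 0)), ('5', (1, 1)), ('8', (1, 2)),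
         ('1', (2, 0)), ('4', (2, 1)), ('7', (2, 2))]).get? '8' = some (1, 2) from by decide]
                    simp [pvAppendCell, pvGather, pvCell, List.count_append, List.replicate_succ']
                  ·
                    by_cases h9 : c = '9'
                    · subst h9
                      rw [show (PySem.Dict.ofList
        [('3', ((0 : Nat), (0 : Nat))), ('6', (0, 1)), ('9', (0, 2)),
         ('2', (1, 0)), ('5', (1, 1)), ('8', (1, 2)),
         ('1', (2, 0)), ('4', (2, 1)), ('7', (2, 2))]).get? '9' = some (0, 2) from by decide]
                      simp [pvAppendCell, pvGather, pvCell, List.count_append, List.replicate_succ']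
                    · -- c is not a layout digit: lookup misses, counts of the nine digits unchanged
                      rw [show (PySem.Dict.ofList
        [('3', ((0 : Nat), (0 : Nat))), ('6', (0, 1)), ('9', (0, 2)),
         ('2', (1, 0)), ('5', (1, 1)), ('8', (1, 2)),
         ('1', (2, 0)), ('4', (2, 1)), ('7', (2, 2))]).get? c = none from by
                        simp [PySem.Dict.ofList, PySem.Dict.update, PySem.Dict.get?_insert, h1, h2, h3, h4, h5, h6, h7, h8, h9]]
                      simp [pvGather, pvCell, List.count_append, h1, h2, h3, h4, h5, h6, h7, h8, h9]

theorem pvA_eq_gather (day month year : Int) :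
    build_psychomatrix day month year =
      pvGather ((PySem.Int.toStr day).toList ++ (PySem.Int.toStr month).toList ++ (PySem.Int.toStr year).toList) := by
  simp [build_psychomatrix, pvGather, pvCell, PySem.Dict.getD_counter,
    PySem.List.pyRepeat_singleton, List.count_filter]
  refine ⟨⟨?_, ?_, ?_⟩, ⟨?_, ?_, ?_⟩, ?_, ?_, ?_⟩ <;> (congr 2 <;> omega)

-- ===== VERDICT (by name: the statement is the Claim_ definition above) =====
theorem build_psychomatrix_spec : Claim_equal_build_psychomatrix := by
  intro day month year _
  show build_psychomatrix day month year = build_psychomatrix_alt day month year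
  rw [pvA_eq_gather, build_psychomatrix_alt, ← pvScatter_eq_gather]
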